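-- pv_equiv track=rewrite | github.com/womri1998/ProjectEuler100s | problem121.py | chance
-- ===== SOURCE A (Python) =====
-- was = {}
--
-- def chance(blue, cur, tot):
--     if cur == tot:
--         if blue > (tot - 1) // 2:
--             return 1
--         else:
--             return 0
--     if (blue, cur, tot) in was:
--         return was[(blue, cur, tot)]
--     x = chance(blue + 1, cur + 1, tot) + cur * chance(blue, cur + 1, tot)
--     was[(blue, cur, tot)] = x
--     return x
-- ===== SOURCE B (Python) =====
-- def chance(blue, cur, tot):
--     # Bottom-up DP over the turn index: row[k] is the value of state
--     # (blue + k, c) for the current level c, starting at the terminal level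
--     # c == tot and sweeping down to c == cur.  No recursion, no memo dict.
--     row = [1 if blue + k > (tot - 1) // 2 else 0 for k in range(tot - cur + 1)]
--     for c in range(tot - 1, cur - 1, -1):
--         row = [hi + c * lo for lo, hi in zip(row, row[1:])]
--     return row[0]
-- ===== Notes on version B (the rewrite author's own statement) =====
-- stated objective: alternative
-- what changed: Replaced A's top-down memoized recursion (global `was` dict) with an iterative bottom-up DP that sweeps the turn index from tot down to cur, keeping one list row indexed by the blue count; each state is visited once by construction, so there is no recursion and no memo.
import Mathlib
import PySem

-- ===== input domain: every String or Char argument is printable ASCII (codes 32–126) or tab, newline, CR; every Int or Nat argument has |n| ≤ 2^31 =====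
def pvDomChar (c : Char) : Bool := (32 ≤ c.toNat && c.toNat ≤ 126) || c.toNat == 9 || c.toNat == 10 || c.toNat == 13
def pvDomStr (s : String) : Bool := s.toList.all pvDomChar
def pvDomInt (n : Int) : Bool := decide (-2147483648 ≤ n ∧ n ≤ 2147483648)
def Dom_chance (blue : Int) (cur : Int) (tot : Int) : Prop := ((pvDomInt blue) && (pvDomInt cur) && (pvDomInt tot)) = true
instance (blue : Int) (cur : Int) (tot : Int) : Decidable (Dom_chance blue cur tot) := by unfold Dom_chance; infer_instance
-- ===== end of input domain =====

-- B replaces A's top-down memoized recursion by a bottom-up DP over one list row (objective: alternative decomposition).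

-- ===== PORT A =====
-- Literal port of A's recursion: the global memo `was` is threaded through as
-- state (each top-level call starts from the empty dict; the memo never changes
-- the value returned).  Fuel (tot-cur).toNat+1 covers every run Pre_ admits;
-- fuel 0 is unreachable under Pre_chance (in Python: infinite recursion).
def chanceGo : Nat → Int → Int → Int → PySem.Dict (Int × Int × Int) Int →
    Int × PySem.Dict (Int × Int × Int) Int
  | 0, _, _, _, was => (0, was)
  | fuel+1, blue, cur, tot, was =>
    if cur = tot then
      ((if blue > PySem.Int.floordiv (tot - 1) 2 then 1 else 0), was)
    else
      match was.get? (blue, cur, tot) with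
      | some v => (v, was)
      | none =>
        let r1 := chanceGo fuel (blue + 1) (cur + 1) tot was
        let r2 := chanceGo fuel blue (cur + 1) tot r1.2
        let x := r1.1 + cur * r2.1
        (x, r2.2.insert (blue, cur, tot) x)

def chance (blue : Int) (cur : Int) (tot : Int) : Int :=
  (chanceGo ((tot - cur).toNat + 1) blue cur tot PySem.Dict.empty).1

-- ===== PORT B =====
-- Port of Source B: terminal row, then one fold over the countdown range; row[0]
-- (Python raises IndexError only when the row is empty, i.e. cur > tot, which
-- Pre_chance excludes; the .getD 0 is that none-case placeholder).
def chance_alt (blue : Int) (cur : Int) (tot : Int) : Int :=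
  let row0 := (PySem.List.pyRange 0 (tot - cur + 1) 1).map
    (fun k => if blue + k > PySem.Int.floordiv (tot - 1) 2 then (1 : Int) else 0)
  let row := (PySem.List.pyRange (tot - 1) (cur - 1) (-1)).foldl
    (fun row c =>
      (row.zip (PySem.List.slice row (some 1) none)).map (fun p => p.2 + c * p.1)) row0
  (PySem.List.pyGet? row 0).getD 0

-- ===== PRECONDITION & SPEC =====
-- Pre_ excludes exactly cur > tot, where A's recursion never reaches its base case
-- (it recurses forever / dies with RecursionError, returning no value).
def Pre_chance (blue : Int) (cur : Int) (tot : Int) : Prop := cur ≤ tot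
instance (blue : Int) (cur : Int) (tot : Int) : Decidable (Pre_chance blue cur tot) := by
  unfold Pre_chance; infer_instance

def pvWitness_chance : Int × Int × Int := (1, 2, 5)

def Spec_chance (blue : Int) (cur : Int) (tot : Int) (out : Int) : Prop := out = chance_alt blue cur tot
instance (blue : Int) (cur : Int) (tot : Int) (out : Int) : Decidable (Spec_chance blue cur tot out) := by unfold Spec_chance; infer_instance

-- ===== CLAIM (what is proved, stated in full; the proofs are below) =====
def Claim_equal_chance : Prop := ∀ (blue : Int) (cur : Int) (tot : Int), Dom_chance blue cur tot → Pre_chance blue cur tot → Spec_chance blue cur tot (chance blue cur tot)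

-- ===== LEMMAS AND PROOFS =====

-- The common recurrence: gSpec d blue cur tot is the value of state (blue, cur)
-- with d = tot - cur levels left.
def gSpec : Nat → Int → Int → Int → Int
  | 0, blue, _, tot => if blue > PySem.Int.floordiv (tot - 1) 2 then 1 else 0
  | d+1, blue, cur, tot => gSpec d (blue + 1) (cur + 1) tot + cur * gSpec d blue (cur + 1) tot

-- every entry of the memo is a correct gSpec value for a non-terminal state
def MemoOK (was : PySem.Dict (Int × Int × Int) Int) : Prop :=
  ∀ b c t v, was.get? (b, c, t) = some v → v = gSpec (t - c).toNat b c t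

lemma chanceGo_correct (fuel : Nat) : ∀ (blue cur tot : Int) was, cur ≤ tot →
    (tot - cur).toNat < fuel → MemoOK was →
    (chanceGo fuel blue cur tot was).1 = gSpec (tot - cur).toNat blue cur tot ∧
      MemoOK (chanceGo fuel blue cur tot was).2 := by
  induction fuel with
  | zero => intro _ _ _ _ _ hf _; omega
  | succ fuel ih =>
    intro blue cur tot was hle hf hmem
    by_cases hct : cur = tot
    · subst hct
      simp [chanceGo, gSpec, hmem]
    · have hlt : cur < tot := lt_of_le_of_ne hle hct
      have hd : (tot - cur).toNat = (tot - (cur + 1)).toNat + 1 := by omega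
      simp only [chanceGo, if_neg hct]
      cases hget : PySem.Dict.get? was (blue, cur, tot) with
      | some v =>
        exact ⟨hmem blue cur tot v hget, hmem⟩
      | none =>
        obtain ⟨h1, m1⟩ := ih (blue + 1) (cur + 1) tot was (by omega) (by omega) hmem
        obtain ⟨h2, m2⟩ := ih blue (cur + 1) tot _ (by omega) (by omega) m1
        constructor
        · simp only [h1, h2, hd, gSpec]
        · intro b c t v hv
          rw [PySem.Dict.get?_insert] at hv
          by_cases hk : (b, c, t) = (blue, cur, tot)
          · rw [if_pos hk] at hv
            simp only [Prod.mk.injEq] at hk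
            obtain ⟨hb, hc, ht⟩ := hk
            subst hb; subst hc; subst ht
            cases hv
            simp only [hd, gSpec, h1, h2]
          · rw [if_neg hk] at hv
            exact m2 b c t v hv

lemma memoOK_empty : MemoOK PySem.Dict.empty := by
  intro b c t v hv
  simp [PySem.Dict.get?_empty] at hv

-- B's step sends the row of level c+1 to the row of level c.
lemma step_row (c : Int) (m : Nat) (f : Nat → Int) :
    ((((List.range (m + 1)).map f).zip
        (PySem.List.slice ((List.range (m + 1)).map f) (some 1) none)).map
      (fun p => p.2 + c * p.1)) =
      (List.range m).map (fun k => f (k + 1) + c * f k) := by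
  rw [PySem.List.slice_from_one]
  apply List.ext_getElem
  · simp
  · intro i h1 h2
    simp only [List.getElem_map, List.getElem_zip, List.getElem_tail, List.getElem_range]

-- the fold from level c down to level cur
lemma fold_rows (blue cur tot : Int) : ∀ (n : Nat) (c : Int), c - cur = n → cur ≤ c → c ≤ tot →
    (PySem.List.pyRange (c - 1) (cur - 1) (-1)).foldl
      (fun row x =>
        (row.zip (PySem.List.slice row (some 1) none)).map (fun p => p.2 + x * p.1))
      ((List.range ((c - cur).toNat + 1)).map
        (fun (k : Nat) => gSpec (tot - c).toNat (blue + (k : Int)) c tot)) =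
      [gSpec (tot - cur).toNat blue cur tot] := by
  intro n
  induction n with
  | zero =>
    intro c h0 hc1 hc2
    have hc : c = cur := by omega
    subst hc
    rw [PySem.List.pyRange_neg_one_eq_nil (by omega)]
    simp
  | succ n ih =>
    intro c h0 hc1 hc2
    rw [PySem.List.pyRange_neg_one_cons (by omega), List.foldl_cons, step_row]
    rw [← ih (c - 1) (by omega) (by omega) (by omega)]
    congr 1
    rw [show ((c - 1) - cur).toNat + 1 = (c - cur).toNat from by omega]
    apply List.map_congr_left
    intro k _
    rw [show (tot - (c - 1)).toNat = (tot - c).toNat + 1 from by omega]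
    simp only [gSpec]
    rw [show c - 1 + 1 = c from by ring]
    push_cast
    ring_nf

lemma chance_alt_eq_gSpec (blue cur tot : Int) (h1 : cur ≤ tot) :
    chance_alt blue cur tot = gSpec (tot - cur).toNat blue cur tot := by
  have hrow0 : (PySem.List.pyRange 0 (tot - cur + 1) 1).map
      (fun k => if blue + k > PySem.Int.floordiv (tot - 1) 2 then (1 : Int) else 0)
      = (List.range ((tot - cur).toNat + 1)).map
          (fun (k : Nat) => gSpec (tot - tot).toNat (blue + (k : Int)) tot tot) := by
    rw [PySem.List.pyRange_one, List.map_map,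
      show (tot - cur + 1 - 0).toNat = (tot - cur).toNat + 1 from by omega,
      show (tot - tot).toNat = 0 from by omega]
    apply List.map_congr_left
    intro k _
    simp only [Function.comp_apply, gSpec, zero_add]
  unfold chance_alt
  rw [hrow0]
  show (PySem.List.pyGet? ((PySem.List.pyRange (tot - 1) (cur - 1) (-1)).foldl
      (fun row c => (row.zip (PySem.List.slice row (some 1) none)).map (fun p => p.2 + c * p.1))
      ((List.range ((tot - cur).toNat + 1)).map
        (fun (k : Nat) => gSpec (tot - tot).toNat (blue + (k : Int)) tot tot))) 0).getD 0 = _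
  rw [fold_rows blue cur tot (tot - cur).toNat tot (by omega) h1 (le_refl tot),
    PySem.List.pyGet?_zero_cons, Option.getD_some]

-- ===== VERDICT =====
theorem chance_spec : Claim_equal_chance := by
  intro blue cur tot _ hpre
  have hA : chance blue cur tot = gSpec (tot - cur).toNat blue cur tot :=
    (chanceGo_correct ((tot - cur).toNat + 1) blue cur tot PySem.Dict.empty hpre
      (by omega) memoOK_empty).1
  show chance blue cur tot = chance_alt blue cur tot
  rw [hA, chance_alt_eq_gSpec blue cur tot hpre]
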